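-- pv_equiv track=rewrite | github.com/ghdwpaks/py_minigames | yatch/main.py | check_yacht
-- ===== SOURCE A (Python) =====
-- def check_yacht(dice) :
--     for i in range(len(dice)) :
--         base_num = dice[i]
--         stack = 0
--         for j in range(len(dice)) :
--             if dice[j] == base_num :
--                 stack += 1
--         if stack >= 5 :
--             return 1
--     return 0
-- ===== SOURCE B (Python) =====
-- def check_yacht(dice):
--     cnt = {}
--     for d in dice:
--         cnt[d] = cnt.get(d, 0) + 1
--     return 1 if any(v >= 5 for v in cnt.values()) else 0
-- ===== Notes on version B (the rewrite author's own statement) =====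
-- stated objective: faster
-- what changed: A rescans the whole list for every element (nested loops); B builds a frequency table in one pass and then checks the table's values for a count >= 5.
import Mathlib
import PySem

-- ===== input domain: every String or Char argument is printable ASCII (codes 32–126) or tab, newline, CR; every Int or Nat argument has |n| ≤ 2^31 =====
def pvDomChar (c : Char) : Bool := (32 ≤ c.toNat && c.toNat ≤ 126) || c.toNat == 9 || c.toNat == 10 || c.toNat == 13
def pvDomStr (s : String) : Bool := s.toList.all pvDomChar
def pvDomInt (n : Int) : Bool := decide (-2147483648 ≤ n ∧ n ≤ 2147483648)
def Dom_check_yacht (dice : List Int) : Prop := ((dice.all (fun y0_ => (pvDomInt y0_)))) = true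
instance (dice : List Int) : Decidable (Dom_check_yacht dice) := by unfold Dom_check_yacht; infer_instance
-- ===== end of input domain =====

-- B replaces A's quadratic rescan-per-element with a one-pass frequency table scanned once afterwards.

-- ===== PORT A =====
-- outer loop: for i over the dice (base_num = dice[i]), with early return 1
def check_yacht_aux (dice : List Int) : List Int → Int
  | [] => 0
  | b :: rest =>
    let stack := dice.foldl (fun stack d => if d == b then stack + 1 else stack) (0 : Int)
    if 5 ≤ stack then 1 else check_yacht_aux dice rest

def check_yacht (dice : List Int) : Int := check_yacht_aux dice dice

-- ===== PORT B =====
def check_yacht_alt (dice : List Int) : Int :=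
  let cnt : PySem.Dict Int Int := dice.foldl (fun c d => c.insert d (c.getD d 0 + 1)) PySem.Dict.empty
  if cnt.values.any (fun v => decide (5 ≤ v)) then 1 else 0

-- ===== PRECONDITION & SPEC =====
def Spec_check_yacht (dice : List Int) (out : Int) : Prop := out = check_yacht_alt dice
instance (dice : List Int) (out : Int) : Decidable (Spec_check_yacht dice out) := by unfold Spec_check_yacht; infer_instance

-- ===== CLAIM (what is proved, stated in full; the proofs are below) =====
def Claim_equal_check_yacht : Prop := ∀ (dice : List Int), Dom_check_yacht dice → Spec_check_yacht dice (check_yacht dice)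

-- ===== LEMMAS AND PROOFS =====

-- A's inner loop counts occurrences of b
theorem innerCount_eq (dice : List Int) (b : Int) :
    dice.foldl (fun stack d => if d == b then stack + 1 else stack) (0 : Int) = (dice.count b : Int) := by
  suffices h : ∀ (s : Int), dice.foldl (fun stack d => if d == b then stack + 1 else stack) s = s + (dice.count b : Int) by
    simpa using h 0
  induction dice with
  | nil => intro s; simp
  | cons x xs ih =>
    intro s
    by_cases hx : x = b
    · subst hx
      simp only [List.foldl, if_pos (beq_self_eq_true x), List.count_cons_self, ih]
      push_cast
      ring
    · have hb : (x == b) = false := by simpa using hx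
      simp only [List.foldl, hb, Bool.false_eq_true, if_false, ih]
      simp [hx]

theorem aux_eq (dice : List Int) (l : List Int) :
    check_yacht_aux dice l = if l.any (fun b => decide (5 ≤ (dice.count b : Int))) then 1 else 0 := by
  induction l with
  | nil => simp [check_yacht_aux]
  | cons b rest ih =>
    simp only [check_yacht_aux, innerCount_eq, List.any_cons, ih]
    by_cases h : 5 ≤ (dice.count b : Int) <;> simp [h]

theorem alt_eq (dice : List Int) :
    check_yacht_alt dice =
      if (PySem.Set.ofList dice).any (fun b => decide (5 ≤ (dice.count b : Int))) then 1 else 0 := by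
  show (if ((dice.foldl (fun c d => c.insert d (c.getD d 0 + 1)) PySem.Dict.empty : PySem.Dict Int Int).values.any
      (fun v => decide (5 ≤ v))) then (1 : Int) else 0) = _
  rw [PySem.Dict.foldl_insert_getD_add_one_eq_counter]
  simp only [PySem.Dict.values, PySem.Dict.items_counter, List.map_map, List.any_map]
  rfl

-- ===== VERDICT (by name: the statement is the Claim_ definition above) =====
theorem check_yacht_spec : Claim_equal_check_yacht := by
  intro dice _
  unfold Spec_check_yacht
  rw [check_yacht, aux_eq, alt_eq]
  congr 1
  simp [List.any_eq_true, PySem.Set.mem_ofList]
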